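-- pv_equiv track=rewrite | github.com/tiagohugovitor/load-balancing-eva-tardos | loadBalancingDynamicProgramming.py | loadBalancingDynamicProgramming
-- ===== SOURCE A (Python) =====
-- def loadBalancingDynamicProgramming(machines, tasks):
--     dp = {}
--     dp[(0,) * machines] = 0
--
--     for task in tasks:
--         newDp = {}
--         for state in dp:
--             for i in range(machines):
--                 newState = list(state)
--                 newState[i] += task
--                 newState = tuple(newState)
--                 newDp[newState] = max(newState)
--         dp = newDp
--
--     return min(max(state) for state in dp.keys())
-- ===== SOURCE B (Python) =====
-- def loadBalancingDynamicProgramming(machines, tasks):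
--     # DP over canonical (sorted) load tuples: permutation-equivalent states are merged.
--     states = {(0,) * machines}
--     for task in tasks:
--         states = {tuple(sorted(s[:i] + (s[i] + task,) + s[i + 1:]))
--                   for s in states
--                   for i in range(machines)}
--     return min(max(s) for s in states)
-- ===== Notes on version B (the rewrite author's own statement) =====
-- stated objective: alternative
-- what changed: B replaces A's dict over all machine-load tuples by a set of canonical (sorted) load tuples, merging permutation-equivalent states so each multiset of loads is expanded only once per task.
import Mathlib
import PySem

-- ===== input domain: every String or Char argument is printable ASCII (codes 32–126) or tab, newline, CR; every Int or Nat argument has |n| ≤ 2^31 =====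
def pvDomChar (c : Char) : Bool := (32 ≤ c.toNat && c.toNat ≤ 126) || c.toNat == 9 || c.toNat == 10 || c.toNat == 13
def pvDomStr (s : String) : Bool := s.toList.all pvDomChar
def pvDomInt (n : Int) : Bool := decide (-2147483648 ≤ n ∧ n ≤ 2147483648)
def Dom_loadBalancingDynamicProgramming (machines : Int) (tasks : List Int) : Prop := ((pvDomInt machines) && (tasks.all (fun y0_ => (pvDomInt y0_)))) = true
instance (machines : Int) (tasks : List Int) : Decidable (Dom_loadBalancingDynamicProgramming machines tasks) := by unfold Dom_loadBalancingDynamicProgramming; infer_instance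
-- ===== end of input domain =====

-- B merges permutation-equivalent machine-load states into one canonical (sorted) tuple,
-- so each multiset of loads is expanded only once per task (objective: alternative).

-- ===== PORT A =====

-- newState = list(state); newState[i] += task; tuple(newState)
-- (i comes from range(machines) and every state has length machines, so the read and
--  the write are always in range; pyGetD/pySetD are exact there)
def pvBumpA (state : List Int) (i : Int) (task : Int) : List Int :=
  PySem.List.pySetD state i (PySem.List.pyGetD state i 0 + task)

-- max(newState) (nonempty under Pre_, where machines ≥ 1)
def pvMaxA (s : List Int) : Int :=
  (PySem.List.max? s (fun x => x)).getD 0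

-- one iteration of 'for task in tasks'.  The dict is ported as Std.HashMap: A only ever
-- uses it as a key set consumed order-independently (min over the maxima of the keys),
-- and the huge state dicts A builds make an association-list dict unevaluable.
def pvStepA (machines : Int) (task : Int) (dp : Std.HashMap (List Int) Int) : Std.HashMap (List Int) Int :=
  dp.keys.foldl (fun newDp state =>
    (PySem.List.pyRange 0 machines 1).foldl (fun nd i =>
      nd.insert (pvBumpA state i task) (pvMaxA (pvBumpA state i task))) newDp)
    Std.HashMap.emptyWithCapacity

def loadBalancingDynamicProgramming (machines : Int) (tasks : List Int) : Int :=
  let dp0 : Std.HashMap (List Int) Int := Std.HashMap.emptyWithCapacity.insert (List.replicate machines.toNat 0) 0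
  let dpF := tasks.foldl (fun dp task => pvStepA machines task dp) dp0
  (PySem.List.min? (dpF.keys.map pvMaxA) (fun x => x)).getD 0

-- ===== PORT B =====

-- max(s) on B's side
def pvMaxB (s : List Int) : Int :=
  (PySem.List.max? s (fun x => x)).getD 0

-- s[:i] + (s[i] + task,) + s[i+1:]
def pvBumpB (s : List Int) (i : Int) (task : Int) : List Int :=
  PySem.List.slice s none (some i) ++ [PySem.List.pyGetD s i 0 + task] ++ PySem.List.slice s (some (i + 1)) none

-- the set comprehension of one 'for task in tasks' iteration
def pvStepB (machines : Int) (task : Int) (states : List (List Int)) : List (List Int) :=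
  PySem.Set.ofList (states.flatMap (fun s =>
    (PySem.List.pyRange 0 machines 1).map (fun i =>
      PySem.List.sorted (pvBumpB s i task) (fun x => x))))

def loadBalancingDynamicProgramming_alt (machines : Int) (tasks : List Int) : Int :=
  let st0 : PySem.Set (List Int) := PySem.Set.ofList [List.replicate machines.toNat 0]
  let stF := tasks.foldl (fun st task => pvStepB machines task st) st0
  (PySem.List.min? (stF.map pvMaxB) (fun x => x)).getD 0

-- ===== PRECONDITION & SPEC =====
-- With machines ≤ 0 both programs reach min()/max() of an empty sequence and raise
-- ValueError; Pre_ excludes exactly those inputs (A returns on every input it admits).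
def Pre_loadBalancingDynamicProgramming (machines : Int) (tasks : List Int) : Prop := 1 ≤ machines
instance (machines : Int) (tasks : List Int) : Decidable (Pre_loadBalancingDynamicProgramming machines tasks) := by unfold Pre_loadBalancingDynamicProgramming; infer_instance

def pvWitness_loadBalancingDynamicProgramming : Int × List Int := (2, [3, 1, 2])

def Spec_loadBalancingDynamicProgramming (machines : Int) (tasks : List Int) (out : Int) : Prop := out = loadBalancingDynamicProgramming_alt machines tasks
instance (machines : Int) (tasks : List Int) (out : Int) : Decidable (Spec_loadBalancingDynamicProgramming machines tasks out) := by unfold Spec_loadBalancingDynamicProgramming; infer_instance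

-- ===== CLAIM (what is proved, stated in full; the proofs are below) =====
def Claim_equal_loadBalancingDynamicProgramming : Prop := ∀ (machines : Int) (tasks : List Int), Dom_loadBalancingDynamicProgramming machines tasks → Pre_loadBalancingDynamicProgramming machines tasks → Spec_loadBalancingDynamicProgramming machines tasks (loadBalancingDynamicProgramming machines tasks)

-- ===== LEMMAS AND PROOFS =====

-- generic membership-through-foldl lemma, used for both nested loops of A's step
theorem pv_foldl_mem_iff {σ α : Type} (step : σ → α → σ) (P : σ → Prop) (Q : α → Prop)
    (h : ∀ acc s, P (step acc s) ↔ P acc ∨ Q s) :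
    ∀ (l : List α) (init : σ), P (l.foldl step init) ↔ P init ∨ ∃ s ∈ l, Q s := by
  intro l
  induction l with
  | nil => simp
  | cons a t ih =>
    intro init
    simp only [List.foldl_cons, ih, h, List.mem_cons]
    constructor
    · rintro ((hp | hq) | ⟨s, hs, hq⟩)
      · exact Or.inl hp
      · exact Or.inr ⟨a, Or.inl rfl, hq⟩
      · exact Or.inr ⟨s, Or.inr hs, hq⟩
    · rintro (hp | ⟨s, (rfl | hs), hq⟩)
      · exact Or.inl (Or.inl hp)
      · exact Or.inl (Or.inr hq)
      · exact Or.inr ⟨s, hs, hq⟩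

theorem pv_mem_keys_stepA (machines task : Int) (dp : Std.HashMap (List Int) Int) (x : List Int) :
    x ∈ (pvStepA machines task dp).keys ↔
      ∃ s ∈ dp.keys, ∃ i ∈ PySem.List.pyRange 0 machines 1, x = pvBumpA s i task := by
  unfold pvStepA
  have hin : ∀ (s : List Int) (acc : Std.HashMap (List Int) Int),
      x ∈ ((PySem.List.pyRange 0 machines 1).foldl
            (fun nd i => nd.insert (pvBumpA s i task) (pvMaxA (pvBumpA s i task))) acc).keys
        ↔ x ∈ acc.keys ∨ ∃ i ∈ PySem.List.pyRange 0 machines 1, x = pvBumpA s i task := by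
    intro s acc
    exact pv_foldl_mem_iff
      (fun nd i => nd.insert (pvBumpA s i task) (pvMaxA (pvBumpA s i task)))
      (fun d => x ∈ d.keys) (fun i => x = pvBumpA s i task)
      (fun acc2 i => by
        simp only [Std.HashMap.mem_keys, Std.HashMap.mem_insert, beq_iff_eq]; tauto) _ acc
  have hout := pv_foldl_mem_iff
      (fun newDp state => (PySem.List.pyRange 0 machines 1).foldl
        (fun nd i => nd.insert (pvBumpA state i task) (pvMaxA (pvBumpA state i task))) newDp)
      (fun d => x ∈ d.keys)
      (fun s => ∃ i ∈ PySem.List.pyRange 0 machines 1, x = pvBumpA s i task)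
      (fun acc s => hin s acc) dp.keys Std.HashMap.emptyWithCapacity
  refine hout.trans ?_
  simp [Std.HashMap.mem_keys]

theorem pv_mem_stepB (machines task : Int) (states : List (List Int)) (x : List Int) :
    x ∈ pvStepB machines task states ↔
      ∃ s ∈ states, ∃ i ∈ PySem.List.pyRange 0 machines 1,
        x = PySem.List.sorted (pvBumpB s i task) (fun y => y) := by
  unfold pvStepB
  simp [PySem.Set.mem_ofList, eq_comm]

-- bump (as A computes it, in range) is list.set
theorem pv_bumpA_eq_set (s : List Int) (i : Int) (task : Int) (h0 : 0 ≤ i) :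
    pvBumpA s i task = s.set i.toNat (PySem.List.pyGetD s i 0 + task) := by
  unfold pvBumpA
  rw [PySem.List.pySetD_of_nonneg _ _ h0]

-- bump (as B computes it, in range) equals A's bump
theorem pv_bumpB_eq_bumpA (s : List Int) (i : Int) (task : Int)
    (h0 : 0 ≤ i) (hlt : i.toNat < s.length) :
    pvBumpB s i task = pvBumpA s i task := by
  unfold pvBumpB
  rw [pv_bumpA_eq_set s i task h0]
  rw [PySem.List.slice_to _ h0, PySem.List.slice_from _ (show (0:Int) ≤ i + 1 by omega)]
  rw [List.set_eq_take_append_cons_drop]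
  have : (i + 1).toNat = i.toNat + 1 := by omega
  simp [hlt, this]

theorem pv_length_bumpA (s : List Int) (i task : Int) :
    (pvBumpA s i task).length = s.length := by
  unfold pvBumpA; exact PySem.List.length_pySetD _ _ _

-- l is a permutation of l[i] :: (l minus index i)
theorem pv_perm_cons_eraseIdx (l : List Int) (i : Nat) (h : i < l.length) :
    l.Perm (l[i] :: l.eraseIdx i) :=
  (List.getElem_cons_eraseIdx_perm h).symm

theorem pv_set_perm_cons_eraseIdx (l : List Int) (i : Nat) (v : Int) (h : i < l.length) :
    (l.set i v).Perm (v :: l.eraseIdx i) := by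
  rw [List.set_eq_take_append_cons_drop]
  simp only [h, if_pos]
  rw [List.eraseIdx_eq_take_drop_succ]
  exact List.perm_middle

-- THE KEY LEMMA: bumping any slot of s is, up to permutation, bumping some slot of
-- any permutation t of s (and the bumped index stays in range).
theorem pv_bump_transfer (s t : List Int) (task : Int) (hperm : s.Perm t)
    (i : Nat) (hi : i < s.length) :
    ∃ j : Nat, ∃ hj : j < t.length,
      (s.set i (s[i] + task)).Perm (t.set j (t[j]'hj + task)) := by
  have hmem : s[i] ∈ t := hperm.mem_iff.mp (List.getElem_mem hi)
  obtain ⟨j, hj, hval⟩ := List.mem_iff_getElem.mp hmem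
  refine ⟨j, hj, ?_⟩
  have h1 := pv_set_perm_cons_eraseIdx s i (s[i] + task) hi
  have h2 := pv_set_perm_cons_eraseIdx t j (t[j] + task) hj
  have hs := pv_perm_cons_eraseIdx s i hi
  have ht := pv_perm_cons_eraseIdx t j hj
  -- s[i] :: eraseIdx s i ~ t[j] :: eraseIdx t j
  have hcons : (s[i] :: s.eraseIdx i).Perm (t[j] :: t.eraseIdx j) :=
    hs.symm.trans (hperm.trans ht)
  have herase : (s.eraseIdx i).Perm (t.eraseIdx j) := by
    rw [hval] at hcons
    exact (List.perm_cons _).mp hcons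
  refine h1.trans (.trans ?_ h2.symm)
  rw [hval]
  exact herase.cons _

-- the invariant carried through the task loop
def pvInv (machines : Int) (dp : Std.HashMap (List Int) Int) (st : List (List Int)) : Prop :=
  dp.keys ≠ [] ∧
  (∀ s ∈ dp.keys, s.length = machines.toNat) ∧
  (∀ x, x ∈ st ↔ ∃ s ∈ dp.keys, x = PySem.List.sorted s (fun y => y))

theorem pv_inv_init (machines : Int) :
    pvInv machines (Std.HashMap.emptyWithCapacity.insert (List.replicate machines.toNat 0) 0)
      (PySem.Set.ofList [List.replicate machines.toNat 0]) := by
  have hkeys : ∀ x : List Int, x ∈ ((Std.HashMap.emptyWithCapacity :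
      Std.HashMap (List Int) Int).insert (List.replicate machines.toNat 0) 0).keys ↔
      x = List.replicate machines.toNat 0 := by
    intro x
    rw [Std.HashMap.mem_keys, Std.HashMap.mem_insert]
    simp only [beq_iff_eq, Std.HashMap.not_mem_emptyWithCapacity, or_false]
    exact eq_comm
  refine ⟨?_, ?_, ?_⟩
  · intro hcontra
    have := (hkeys (List.replicate machines.toNat 0)).mpr rfl
    rw [hcontra] at this
    simp at this
  · intro s hs
    rw [hkeys] at hs
    simp [hs]
  · intro x
    have hsorted : PySem.List.sorted (List.replicate machines.toNat 0) (fun y : Int => y)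
        = List.replicate machines.toNat 0 :=
      PySem.List.sorted_eq_self_of_pairwise _ _ (by
        apply List.pairwise_replicate.mpr; simp)
    simp [PySem.Set.mem_ofList, hkeys, hsorted]

theorem pv_inv_step (machines task : Int) (hm : 1 ≤ machines)
    (dp : Std.HashMap (List Int) Int) (st : List (List Int))
    (h : pvInv machines dp st) :
    pvInv machines (pvStepA machines task dp) (pvStepB machines task st) := by
  obtain ⟨hne, hlen, hmem⟩ := h
  have hmN : (0 : Int) < machines := by omega
  refine ⟨?_, ?_, ?_⟩
  · -- nonempty: bump the first key at slot 0
    obtain ⟨s0, hs0⟩ : ∃ s0, s0 ∈ dp.keys := by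
      cases hk : dp.keys with
      | nil => exact absurd hk hne
      | cons a t => exact ⟨a, by simp⟩
    intro hcontra
    have : pvBumpA s0 0 task ∈ (pvStepA machines task dp).keys :=
      (pv_mem_keys_stepA machines task dp _).mpr
        ⟨s0, hs0, 0, PySem.List.mem_pyRange_one.mpr ⟨le_refl _, hmN⟩, rfl⟩
    rw [hcontra] at this
    simp at this
  · -- lengths preserved
    intro x hx
    obtain ⟨s, hs, i, _, rfl⟩ := (pv_mem_keys_stepA machines task dp x).mp hx
    rw [pv_length_bumpA]
    exact hlen s hs
  · -- membership correspondence
    intro x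
    rw [pv_mem_stepB]
    constructor
    · rintro ⟨t, ht, j, hjr, rfl⟩
      obtain ⟨s, hs, rfl⟩ := (hmem t).mp ht
      obtain ⟨hj0, hjm⟩ := PySem.List.mem_pyRange_one.mp hjr
      set t := PySem.List.sorted s (fun y : Int => y) with hteq
      have htperm : t.Perm s := PySem.List.sorted_perm s _ _
      have hts : t.length = s.length := htperm.length_eq
      have hjlt : j.toNat < t.length := by
        rw [hts, hlen s hs]; omega
      -- B's bump of t at j ~ A's bump of s at some i
      obtain ⟨i, hilt, hpermset⟩ :=
        pv_bump_transfer t s task htperm j.toNat hjlt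
      refine ⟨pvBumpA s (i : Int) task,
        (pv_mem_keys_stepA machines task dp _).mpr
          ⟨s, hs, (i : Int), PySem.List.mem_pyRange_one.mpr ⟨by omega, by
            have := hlen s hs; omega⟩, rfl⟩, ?_⟩
      rw [pv_bumpB_eq_bumpA _ _ _ hj0 hjlt]
      rw [pv_bumpA_eq_set _ _ _ hj0, pv_bumpA_eq_set _ _ _ (by positivity)]
      have hget_t : PySem.List.pyGetD t j 0 = t[j.toNat] := by
        rw [PySem.List.pyGetD_of_nonneg _ _ hj0, List.getD_eq_getElem _ _ hjlt]
      have hget_s : PySem.List.pyGetD s (i : Int) 0 = s[i] := by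
        rw [PySem.List.pyGetD_of_nonneg _ _ (by positivity), List.getD_eq_getElem]
        · simp
        · simpa using hilt
      rw [hget_t, hget_s]
      simp only [Int.toNat_natCast]
      exact PySem.List.sorted_eq_sorted_of_perm _ _ _ (fun a b h => h) hpermset
    · rintro ⟨a, ha, rfl⟩
      obtain ⟨s, hs, i, hir, rfl⟩ := (pv_mem_keys_stepA machines task dp a).mp ha
      obtain ⟨hi0, him⟩ := PySem.List.mem_pyRange_one.mp hir
      have hslen : s.length = machines.toNat := hlen s hs
      have hilt : i.toNat < s.length := by omega
      set t := PySem.List.sorted s (fun y : Int => y) with hteq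
      have htperm : s.Perm t := (PySem.List.sorted_perm s _ _).symm
      obtain ⟨j, hjlt, hpermset⟩ := pv_bump_transfer s t task htperm i.toNat hilt
      have htlen : t.length = s.length := htperm.length_eq.symm
      refine ⟨t, (hmem t).mpr ⟨s, hs, rfl⟩, (j : Int),
        PySem.List.mem_pyRange_one.mpr ⟨by omega, by omega⟩, ?_⟩
      rw [pv_bumpB_eq_bumpA _ _ _ (by positivity) (by simp; omega)]
      rw [pv_bumpA_eq_set _ _ _ hi0, pv_bumpA_eq_set _ _ _ (by positivity)]
      have hget_s : PySem.List.pyGetD s i 0 = s[i.toNat] := by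
        rw [PySem.List.pyGetD_of_nonneg _ _ hi0, List.getD_eq_getElem _ _ hilt]
      have hget_t : PySem.List.pyGetD t (j : Int) 0 = t[j] := by
        rw [PySem.List.pyGetD_of_nonneg _ _ (by positivity), List.getD_eq_getElem]
        · simp
        · simpa using hjlt
      rw [hget_s, hget_t]
      simp only [Int.toNat_natCast]
      exact PySem.List.sorted_eq_sorted_of_perm _ _ _ (fun a b h => h) hpermset

-- max?(id) is a permutation invariant
theorem pv_max?_perm (l l' : List Int) (h : l.Perm l') :
    PySem.List.max? l (fun y => y) = PySem.List.max? l' (fun y => y) := by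
  cases hl : PySem.List.max? l (fun y : Int => y) with
  | none =>
    rw [PySem.List.max?_eq_none_iff] at hl
    subst hl
    rw [show l' = [] from List.perm_nil.mp h.symm]
    exact ((PySem.List.max?_eq_none_iff [] _).mpr rfl).symm
  | some m =>
    cases hl' : PySem.List.max? l' (fun y : Int => y) with
    | none =>
      rw [PySem.List.max?_eq_none_iff] at hl'
      subst hl'
      rw [show l = [] from List.perm_nil.mp h] at hl
      simp [PySem.List.max?] at hl
    | some m' =>
      have h1 : m ≤ m' := PySem.List.max?_isMax hl' m (h.mem_iff.mp (PySem.List.max?_mem hl))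
      have h2 : m' ≤ m := PySem.List.max?_isMax hl m' (h.symm.mem_iff.mp (PySem.List.max?_mem hl'))
      rw [le_antisymm h1 h2]

-- min?(id) of two int lists with the same members and the same (non)emptiness agree
theorem pv_min?_congr_mem (l l' : List Int)
    (hmem : ∀ x, x ∈ l ↔ x ∈ l') :
    PySem.List.min? l (fun y => y) = PySem.List.min? l' (fun y => y) := by
  cases hl : PySem.List.min? l (fun y : Int => y) with
  | none =>
    rw [PySem.List.min?_eq_none_iff] at hl
    subst hl
    cases hl' : PySem.List.min? l' (fun y : Int => y) with
    | none => rfl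
    | some m' =>
      have := PySem.List.min?_mem hl'
      rw [← hmem] at this
      simp at this
  | some m =>
    cases hl' : PySem.List.min? l' (fun y : Int => y) with
    | none =>
      rw [PySem.List.min?_eq_none_iff] at hl'
      subst hl'
      have := PySem.List.min?_mem hl
      rw [hmem] at this
      simp at this
    | some m' =>
      have h1 : m' ≤ m := PySem.List.min?_isMin hl' m ((hmem m).mp (PySem.List.min?_mem hl))
      have h2 : m ≤ m' := PySem.List.min?_isMin hl m' ((hmem m').mpr (PySem.List.min?_mem hl'))
      rw [le_antisymm h2 h1]

theorem pv_inv_final (machines : Int) (dp : Std.HashMap (List Int) Int) (st : List (List Int))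
    (h : pvInv machines dp st) :
    (PySem.List.min? (dp.keys.map pvMaxA) (fun x => x)).getD 0
      = (PySem.List.min? (st.map pvMaxB) (fun x => x)).getD 0 := by
  obtain ⟨_, _, hmem⟩ := h
  rw [pv_min?_congr_mem]
  intro x
  simp only [List.mem_map]
  constructor
  · rintro ⟨s, hs, rfl⟩
    refine ⟨PySem.List.sorted s (fun y => y), (hmem _).mpr ⟨s, hs, rfl⟩, ?_⟩
    unfold pvMaxA pvMaxB
    rw [pv_max?_perm _ s (PySem.List.sorted_perm s _ _)]
  · rintro ⟨t, ht, rfl⟩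
    obtain ⟨s, hs, rfl⟩ := (hmem t).mp ht
    refine ⟨s, hs, ?_⟩
    unfold pvMaxA pvMaxB
    rw [pv_max?_perm _ s (PySem.List.sorted_perm s _ _)]

theorem pv_inv_fold (machines : Int) (hm : 1 ≤ machines) (tasks : List Int)
    (dp : Std.HashMap (List Int) Int) (st : List (List Int)) (h : pvInv machines dp st) :
    pvInv machines (tasks.foldl (fun d task => pvStepA machines task d) dp)
      (tasks.foldl (fun s task => pvStepB machines task s) st) := by
  induction tasks generalizing dp st with
  | nil => exact h
  | cons a t ih =>
    exact ih _ _ (pv_inv_step machines a hm dp st h)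

-- ===== VERDICT (by name: the statement is the Claim_ definition above) =====
theorem loadBalancingDynamicProgramming_spec : Claim_equal_loadBalancingDynamicProgramming := by
  intro machines tasks _ hpre
  unfold Spec_loadBalancingDynamicProgramming
  unfold loadBalancingDynamicProgramming loadBalancingDynamicProgramming_alt
  exact pv_inv_final machines _ _
    (pv_inv_fold machines hpre tasks _ _ (pv_inv_init machines))
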